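-- pv_equiv track=rewrite | github.com/DarrenVawter/PublicProjects | EqnFitter/GetUserInput.py | getOutterParendIndicies
-- ===== SOURCE A (Python) =====
-- def getOutterParendIndicies(eqn:str):
--
--     if(eqn is None):
--         raise Exception("Empty equation string.")
--
--     opi = []
--
--     nOpening = 0
--     nClosing = 0
--
--     for i in range (len(eqn)):
--
--         if(eqn[i]=='('):
--             if(nOpening==nClosing):
--                 opi.append(i)
--             nOpening += 1
--         elif(eqn[i]==')'):
--             nClosing += 1
--             if(nOpening==nClosing):
--                 opi.append(i)
--
--     return opi
-- ===== SOURCE B (Python) =====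
-- def getOutterParendIndicies(eqn: str):
--
--     if eqn is None:
--         raise Exception("Empty equation string.")
--
--     # pass 1: prefix depth table; depths[i] = #'(' - #')' among eqn[:i]
--     depths = []
--     d = 0
--     for c in eqn:
--         depths.append(d)
--         d += (c == '(') - (c == ')')
--
--     # pass 2: select indices where an outermost pair opens/closes
--     return [i for i, (c, d) in enumerate(zip(eqn, depths))
--             if (c == '(' and d == 0) or (c == ')' and d == 1)]
-- ===== Notes on version B (the rewrite author's own statement) =====
-- stated objective: alternative
-- what changed: Replaces the fused scan with two running counters by a two-pass decomposition: first build a prefix-depth table, then select indices where an opening parenthesis occurs at depth 0 or a closing one at depth 1.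
import Mathlib
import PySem

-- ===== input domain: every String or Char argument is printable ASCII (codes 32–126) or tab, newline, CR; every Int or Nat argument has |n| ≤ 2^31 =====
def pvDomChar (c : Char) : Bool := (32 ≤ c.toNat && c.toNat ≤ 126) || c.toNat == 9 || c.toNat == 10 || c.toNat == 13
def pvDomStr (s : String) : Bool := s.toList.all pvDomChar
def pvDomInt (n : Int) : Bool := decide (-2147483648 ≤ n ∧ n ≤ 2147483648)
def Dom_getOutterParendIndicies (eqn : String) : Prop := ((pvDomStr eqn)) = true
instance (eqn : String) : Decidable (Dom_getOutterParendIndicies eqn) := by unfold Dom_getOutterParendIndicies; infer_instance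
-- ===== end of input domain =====

-- B replaces A's single fused scan (two counters, appending as it goes) with a two-pass
-- decomposition: a prefix-depth table, then a selection pass. Equivalence of return values.

-- ===== PORT A =====
-- A's loop: for i in range(len(eqn)), with counters nOpening / nClosing.
def goA : List Char → Int → Int → Int → List Int
  | [], _, _, _ => []
  | c :: rest, i, nO, nC =>
    if c = '(' then
      if nO = nC then i :: goA rest (i + 1) (nO + 1) nC
      else goA rest (i + 1) (nO + 1) nC
    else if c = ')' then
      if nO = nC + 1 then i :: goA rest (i + 1) nO (nC + 1)
      else goA rest (i + 1) nO (nC + 1)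
    else goA rest (i + 1) nO nC

def getOutterParendIndicies (eqn : String) : List Int := goA eqn.toList 0 0 0

-- ===== PORT B =====
-- pass 1 of Source B: the prefix-depth table
def mkDepths : List Char → Int → List Int
  | [], _ => []
  | c :: rest, d =>
    d :: mkDepths rest (d + (if c = '(' then 1 else 0) - (if c = ')' then 1 else 0))

-- pass 2 of Source B: the selection comprehension over enumerate(zip(eqn, depths))
def selB : List Char → List Int → Int → List Int
  | c :: cs, d :: ds, i =>
    if (c = '(' ∧ d = 0) ∨ (c = ')' ∧ d = 1) then i :: selB cs ds (i + 1)
    else selB cs ds (i + 1)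
  | _, _, _ => []

def getOutterParendIndicies_alt (eqn : String) : List Int :=
  selB eqn.toList (mkDepths eqn.toList 0) 0

-- ===== PRECONDITION & SPEC =====
def Spec_getOutterParendIndicies (eqn : String) (out : List Int) : Prop := out = getOutterParendIndicies_alt eqn
instance (eqn : String) (out : List Int) : Decidable (Spec_getOutterParendIndicies eqn out) := by unfold Spec_getOutterParendIndicies; infer_instance

-- ===== CLAIM (what is proved, stated in full; the proofs are below) =====
def Claim_equal_getOutterParendIndicies : Prop := ∀ (eqn : String), Dom_getOutterParendIndicies eqn → Spec_getOutterParendIndicies eqn (getOutterParendIndicies eqn)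

-- ===== LEMMAS AND PROOFS =====

-- A's fused scan equals B's select-over-depth-table when the table starts at nO - nC.
theorem goA_eq_selB (cs : List Char) : ∀ (i nO nC : Int),
    goA cs i nO nC = selB cs (mkDepths cs (nO - nC)) i := by
  induction cs with
  | nil => intro i nO nC; rfl
  | cons c rest ih =>
    intro i nO nC
    by_cases hOpen : c = '('
    · have hne : ¬ c = ')' := by simp [hOpen]
      simp only [goA, mkDepths, selB, hOpen, hne, if_true, if_false]
      by_cases h : nO = nC
      · have h0 : nO - nC = 0 := by omega
        have : (nO + 1) - nC = (nO - nC) + 1 - 0 := by omega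
        simp [h, h0, this, ih]
      · have h0 : ¬ (nO - nC = 0) := by omega
        have : (nO + 1) - nC = (nO - nC) + 1 - 0 := by omega
        simp [h, h0, hOpen, this, ih]
    · by_cases hClose : c = ')'
      · simp only [goA, mkDepths, selB, hOpen, hClose, if_true, if_false]
        by_cases h : nO = nC + 1
        · have h1 : nO - nC = 1 := by omega
          have : nO - (nC + 1) = (nO - nC) + 0 - 1 := by omega
          simp [h, h1, hClose, this, ih]
        · have h1 : ¬ (nO - nC = 1) := by omega
          have : nO - (nC + 1) = (nO - nC) + 0 - 1 := by omega
          simp [h, h1, hOpen, hClose, this, ih]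
      · simp only [goA, mkDepths, selB, hOpen, hClose, if_false]
        have : nO - nC + 0 - 0 = nO - nC := by omega
        simp [hOpen, hClose, this, ih]

-- ===== VERDICT (by name: the statement is the Claim_ definition above) =====
theorem getOutterParendIndicies_spec : Claim_equal_getOutterParendIndicies := by
  intro eqn _
  unfold Spec_getOutterParendIndicies getOutterParendIndicies getOutterParendIndicies_alt
  simpa using goA_eq_selB eqn.toList 0 0 0
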